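-- pv_equiv track=rewrite | github.com/siddij3/ReinforcementLearning | features/career_smoothness.py | _seniority_level
-- ===== SOURCE A (Python) =====
-- SENIORITY_LEVELS = {
--     "intern": 0, "junior": 1, "associate": 1, "engineer": 2,
--     "senior engineer": 3, "senior": 3, "lead": 4, "staff": 5,
--     "principal": 6, "director": 7, "vp": 8, "head of": 7,
-- }
--
-- def _seniority_level(title: str) -> int:
--     title_lower = title.lower()
--     best = 2  # default: generic engineer
--     for key, level in sorted(SENIORITY_LEVELS.items(), key=lambda x: -x[1]):
--         if key in title_lower:
--             best = level
--             break
--     return best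
-- ===== SOURCE B (Python) =====
-- SENIORITY_LEVELS = {
--     "intern": 0, "junior": 1, "associate": 1, "engineer": 2,
--     "senior engineer": 3, "senior": 3, "lead": 4, "staff": 5,
--     "principal": 6, "director": 7, "vp": 8, "head of": 7,
-- }
--
-- def _seniority_level(title: str) -> int:
--     title_lower = title.lower()
--     matched = [lvl for key, lvl in SENIORITY_LEVELS.items() if key in title_lower]
--     return max(matched, default=2)
-- ===== Notes on version B (the rewrite author's own statement) =====
-- stated objective: simpler
-- what changed: B drops the sort and the early-break first-hit loop: it collects the levels of all matching keys in one pass and returns their maximum (default 2), which equals A's first hit in descending-level order.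
import Mathlib
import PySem

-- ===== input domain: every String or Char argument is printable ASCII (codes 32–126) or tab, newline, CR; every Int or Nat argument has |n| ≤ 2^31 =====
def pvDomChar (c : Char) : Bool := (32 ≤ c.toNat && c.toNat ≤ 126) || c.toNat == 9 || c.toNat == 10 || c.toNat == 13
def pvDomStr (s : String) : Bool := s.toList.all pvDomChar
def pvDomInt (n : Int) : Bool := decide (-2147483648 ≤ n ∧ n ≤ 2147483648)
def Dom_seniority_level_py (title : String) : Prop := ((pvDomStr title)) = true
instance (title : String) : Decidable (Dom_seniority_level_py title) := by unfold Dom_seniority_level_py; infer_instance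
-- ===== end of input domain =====

-- B replaces A's sort + first-hit break by one pass collecting all matching levels and taking their max (default 2); same result, simpler.

-- SENIORITY_LEVELS, in dict insertion order (shared module constant)
def pvSENIORITY_LEVELS : List (String × Int) :=
  [("intern", 0), ("junior", 1), ("associate", 1), ("engineer", 2),
   ("senior engineer", 3), ("senior", 3), ("lead", 4), ("staff", 5),
   ("principal", 6), ("director", 7), ("vp", 8), ("head of", 7)]

-- ===== PORT A =====
-- 'for key, level in sorted(...): if key in title_lower: best = level; break' — first hit wins, else the default 2
def pvLoopA (tl : String) : List (String × Int) → Int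
  | [] => 2
  | (k, lvl) :: rest => if PySem.Str.isIn k tl then lvl else pvLoopA tl rest

def seniority_level_py (title : String) : Int :=
  pvLoopA (PySem.Str.lower title)
    (PySem.List.sorted pvSENIORITY_LEVELS (fun x => -x.2) false)

-- ===== PORT B =====
-- matched = [lvl for key, lvl in SENIORITY_LEVELS.items() if key in title_lower]
-- max(matched, default=2)
def pvPyMaxD (d : Int) : List Int → Int
  | [] => d
  | x :: t => t.foldl max x

def seniority_level_py_alt (title : String) : Int :=
  let tl := PySem.Str.lower title
  pvPyMaxD 2 ((pvSENIORITY_LEVELS.filter (fun p => PySem.Str.isIn p.1 tl)).map (·.2))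

-- ===== PRECONDITION & SPEC =====
def Spec_seniority_level_py (title : String) (out : Int) : Prop := out = seniority_level_py_alt title
instance (title : String) (out : Int) : Decidable (Spec_seniority_level_py title out) := by unfold Spec_seniority_level_py; infer_instance

-- ===== CLAIM (what is proved, stated in full; the proofs are below) =====
def Claim_equal_seniority_level_py : Prop := ∀ (title : String), Dom_seniority_level_py title → Spec_seniority_level_py title (seniority_level_py title)

-- ===== LEMMAS AND PROOFS =====

-- Python max(x::t) is the greatest element of x::t.
theorem pvMax_spec (x : Int) (t : List Int) :
    (t.foldl max x = x ∨ t.foldl max x ∈ t) ∧ x ≤ t.foldl max x ∧ ∀ y ∈ t, y ≤ t.foldl max x :=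
  ⟨PySem.List.foldl_max_mem t x, (PySem.List.le_foldl_max t x).1, (PySem.List.le_foldl_max t x).2⟩

-- max(l, default=d) is permutation invariant.
theorem pvPyMaxD_perm (d : Int) {l l' : List Int} (h : l.Perm l') :
    pvPyMaxD d l = pvPyMaxD d l' := by
  cases l with
  | nil => rw [h.symm.eq_nil]
  | cons x t =>
    cases l' with
    | nil => exact absurd h.eq_nil (by simp)
    | cons y s =>
      obtain ⟨hm, hx, hub⟩ := pvMax_spec x t
      obtain ⟨hm', hy, hub'⟩ := pvMax_spec y s
      have hmem : t.foldl max x ∈ y :: s := by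
        refine h.mem_iff.mp ?_
        rcases hm with h1 | h1 <;> simp [h1]
      have hmem' : s.foldl max y ∈ x :: t := by
        refine h.mem_iff.mpr ?_
        rcases hm' with h1 | h1 <;> simp [h1]
      have hle : t.foldl max x ≤ s.foldl max y := by
        rcases List.mem_cons.mp hmem with h1 | h1
        · exact h1 ▸ hy
        · exact hub' _ h1
      have hle' : s.foldl max y ≤ t.foldl max x := by
        rcases List.mem_cons.mp hmem' with h1 | h1
        · exact h1 ▸ hx
        · exact hub _ h1
      simpa [pvPyMaxD] using le_antisymm hle hle'

-- On a list whose levels are nonincreasing, first-hit = max of all hits (default 2).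
theorem pvLoopA_eq_max (tl : String) :
    ∀ (L : List (String × Int)), L.Pairwise (fun a b => b.2 ≤ a.2) →
      pvLoopA tl L = pvPyMaxD 2 ((L.filter (fun p => PySem.Str.isIn p.1 tl)).map (·.2)) := by
  intro L hL
  induction L with
  | nil => rfl
  | cons p rest ih =>
    obtain ⟨k, v⟩ := p
    obtain ⟨hhead, htail⟩ := List.pairwise_cons.mp hL
    by_cases hk : PySem.Str.isIn k tl
    · have : ∀ y ∈ (rest.filter (fun p => PySem.Str.isIn p.1 tl)).map (·.2), y ≤ v := by
        intro y hy
        obtain ⟨q, hq, rfl⟩ := List.mem_map.mp hy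
        exact hhead q (List.mem_of_mem_filter hq)
      obtain ⟨hm, hx, _⟩ := pvMax_spec v ((rest.filter (fun p => PySem.Str.isIn p.1 tl)).map (·.2))
      have hle : ((rest.filter (fun p => PySem.Str.isIn p.1 tl)).map (·.2)).foldl max v = v := by
        rcases hm with h1 | h1
        · exact h1
        · exact le_antisymm (this _ h1) hx
      simp only [PySem.Str.isIn] at hk hle
      simp [pvLoopA, pvPyMaxD, PySem.Str.isIn, hk, hle]
    · have ih' := ih htail
      simp only [PySem.Str.isIn] at hk ih'
      simp [pvLoopA, pvPyMaxD, PySem.Str.isIn, hk, ih']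

-- The sorted list's levels are nonincreasing.
theorem pvSorted_pairwise :
    (PySem.List.sorted pvSENIORITY_LEVELS (fun x : String × Int => -x.2) false).Pairwise
      (fun a b => b.2 ≤ a.2) := by
  have h := PySem.List.sorted_pairwise pvSENIORITY_LEVELS (fun x : String × Int => -x.2)
  exact h.imp (by intro a b hab; omega)

-- ===== VERDICT (by name: the statement is the Claim_ definition above) =====
theorem seniority_level_py_spec : Claim_equal_seniority_level_py := by
  intro title _
  unfold Spec_seniority_level_py seniority_level_py seniority_level_py_alt
  rw [pvLoopA_eq_max _ _ pvSorted_pairwise]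
  exact pvPyMaxD_perm 2
    (((PySem.List.sorted_perm pvSENIORITY_LEVELS (fun x : String × Int => -x.2) false).filter _).map _)
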